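-- pv_equiv track=rewrite | github.com/devscanr/parsers | extractors/match.py | to_variants
-- ===== SOURCE A (Python) =====
-- SEPS = ["", "-", " "]
--
-- def to_variants(phrase: str) -> list[str]:
--   if "=" in phrase:
--     [head, tail] = phrase.split("=", maxsplit=1)
--     tail_variants = to_variants(tail)
--     return [
--       head + x + variant for variant in tail_variants
--       for x in SEPS
--     ]
--   else:
--     return [phrase]
-- ===== SOURCE B (Python) =====
-- SEPS = ["", "-", " "]
--
-- def to_variants(phrase: str) -> list[str]:
--   parts = phrase.split("=")
--   variants = [parts[-1]]
--   for head in reversed(parts[:-1]):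
--     variants = [head + sep + v for v in variants for sep in SEPS]
--   return variants
-- ===== Notes on version B (the rewrite author's own statement) =====
-- stated objective: alternative
-- what changed: Replaces A's recursion on maxsplit-1 separator splits with a single full split on the separator followed by an iterative right-to-left fold over the parts that rebuilds the variant list.
import Mathlib
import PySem

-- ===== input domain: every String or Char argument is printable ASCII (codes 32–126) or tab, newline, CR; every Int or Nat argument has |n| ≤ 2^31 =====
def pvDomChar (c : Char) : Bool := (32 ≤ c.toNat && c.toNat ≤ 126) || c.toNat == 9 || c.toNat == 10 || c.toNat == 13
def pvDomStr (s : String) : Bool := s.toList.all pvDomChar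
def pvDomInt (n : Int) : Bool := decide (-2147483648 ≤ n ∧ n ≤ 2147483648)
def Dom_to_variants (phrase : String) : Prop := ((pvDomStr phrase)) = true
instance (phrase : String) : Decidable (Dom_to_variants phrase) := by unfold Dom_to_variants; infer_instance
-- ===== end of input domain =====

-- B replaces A's recursion on '='-splits by one full split plus a right-to-left fold over the parts (objective: alternative decomposition, same cost).
-- SEPS = ["", "-", " "]  (module constant, shared by both programs)
def pvSeps : List (List Char) := [[], ['-'], [' ']]

-- ===== PORT A =====
-- A works on Python str; the ports work on List Char (PySem's string carrier) with a String wrapper.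
-- Characterisation of s.split("=", maxsplit=1) needed by the port's termination argument (cited in decreasing_by):
theorem pvGoZero (fuel : ℕ) (l cur : List Char) (acc : List (List Char)) :
    PySem.Chars.splitOnMax.go ['='] fuel 0 l cur acc = acc.reverse ++ [cur.reverse ++ l] := by
  cases fuel with
  | zero => simp [PySem.Chars.splitOnMax.go]
  | succ f => cases l with
    | nil => simp [PySem.Chars.splitOnMax.go]
    | cons c rest => simp [PySem.Chars.splitOnMax.go]

theorem pvGoOne (fuel : ℕ) : ∀ (l cur : List Char) (acc : List (List Char)), l.length ≤ fuel →
    PySem.Chars.splitOnMax.go ['='] fuel 1 l cur acc =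
      acc.reverse ++ (if '=' ∈ l then [cur.reverse ++ l.takeWhile (· ≠ '='), (l.dropWhile (· ≠ '=')).tail]
                      else [cur.reverse ++ l]) := by
  induction fuel with
  | zero =>
    intro l cur acc hl
    have : l = [] := List.eq_nil_of_length_eq_zero (Nat.le_zero.mp hl)
    subst this; simp [PySem.Chars.splitOnMax.go]
  | succ f ih =>
    intro l cur acc hl
    cases l with
    | nil => simp [PySem.Chars.splitOnMax.go]
    | cons c rest =>
      by_cases hc : c = '='
      · subst hc
        simp only [PySem.Chars.splitOnMax.go, List.isPrefixOf, List.mem_cons]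
        rw [if_neg (by norm_num), if_pos (by simp)]
        simp [pvGoZero, List.takeWhile, List.dropWhile]
      · have hpre : List.isPrefixOf ['='] (c :: rest) = false := by
          simp [List.isPrefixOf]; intro h; exact absurd h.symm hc
        simp only [PySem.Chars.splitOnMax.go]
        rw [if_neg (by norm_num), hpre]
        simp only [Bool.false_eq_true, if_false]
        rw [ih rest (c :: cur) acc (by simpa using Nat.lt_succ_iff.mp (by simpa using hl))]
        have hmem : ('=' ∈ c :: rest) = ('=' ∈ rest) := by
          simp [List.mem_cons, Ne.symm hc]
        by_cases hm : '=' ∈ rest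
        · rw [if_pos hm, if_pos (by simp [hm])]
          simp [List.takeWhile, List.dropWhile, hc]
        · rw [if_neg hm, if_neg (by simp [hm, Ne.symm hc])]
          simp

theorem pvSplitMax1_mem (s : List Char) (h : '=' ∈ s) :
    PySem.Chars.splitOnMax s ['='] 1 = [s.takeWhile (· ≠ '='), (s.dropWhile (· ≠ '=')).tail] := by
  unfold PySem.Chars.splitOnMax
  rw [if_neg (by norm_num), show (1 : ℤ).toNat = 1 from rfl]
  rw [pvGoOne (s.length + 1) s [] [] (by omega)]
  simp [h]

theorem pvTailLt (s tail : List Char)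
    (ht : tail = (s.dropWhile (· ≠ '=')).tail)
    (h : '=' ∈ s) : tail.length < s.length := by
  subst ht
  have hdw : s.dropWhile (· ≠ '=') ≠ [] := by
    intro hnil
    have := List.dropWhile_eq_nil_iff.mp hnil '=' h
    simp at this
  have h1 : (s.dropWhile (· ≠ '=')).tail.length < (s.dropWhile (· ≠ '=')).length := by
    cases hdwe : s.dropWhile (· ≠ '=') with
    | nil => exact absurd hdwe hdw
    | cons a l => simp
  have h2l : (s.dropWhile (· ≠ '=')).length ≤ s.length := List.length_dropWhile_le _ _
  omega

def toVariantsAux (s : List Char) : List (List Char) :=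
  if PySem.Chars.isIn ['='] s then
    match h2 : PySem.Chars.splitOnMax s ['='] 1 with
    | [head, tail] =>
      (toVariantsAux tail).flatMap (fun variant => pvSeps.map (fun x => head ++ x ++ variant))
    | _ => []
  else [s]
termination_by s.length
decreasing_by
  rename_i hin
  have hmem : '=' ∈ s := by
    have := (PySem.Chars.isIn_iff_infix ['='] s).mp hin
    simpa using this.mem (by simp)
  rw [pvSplitMax1_mem s hmem] at h2
  injection h2 with ha h2'
  injection h2' with hb _
  exact pvTailLt s tail hb.symm hmem

def to_variants (phrase : String) : List String :=
  (toVariantsAux phrase.toList).map fun cs => String.ofList cs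

-- ===== PORT B =====
def toVariantsAltAux (s : List Char) : List (List Char) :=
  let parts := PySem.Chars.splitOn s ['=']
  let init : List (List Char) := [(PySem.List.pyGet? parts (-1)).getD []]
  (PySem.List.slice parts none (some (-1))).reverse.foldl
    (fun variants head => variants.flatMap (fun v => pvSeps.map (fun sep => head ++ sep ++ v))) init

def to_variants_alt (phrase : String) : List String :=
  (toVariantsAltAux phrase.toList).map fun cs => String.ofList cs

-- ===== PRECONDITION & SPEC =====
def Spec_to_variants (phrase : String) (out : List String) : Prop := out = to_variants_alt phrase
instance (phrase : String) (out : List String) : Decidable (Spec_to_variants phrase out) := by unfold Spec_to_variants; infer_instance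

-- ===== CLAIM (what is proved, stated in full; the proofs are below) =====
def Claim_equal_to_variants : Prop := ∀ (phrase : String), Dom_to_variants phrase → Spec_to_variants phrase (to_variants phrase)

-- ===== LEMMAS AND PROOFS =====
-- Recursive characterisation of PySem.Chars.splitOn on the single-character separator '='.
def pvConsHead (pre : List Char) : List (List Char) → List (List Char)
  | [] => [pre]
  | p :: ps => (pre ++ p) :: ps

def pvSp : List Char → List (List Char)
  | [] => [[]]
  | c :: rest => if c = '=' then [] :: pvSp rest else pvConsHead [c] (pvSp rest)

theorem pvSp_ne_nil (l : List Char) : pvSp l ≠ [] := by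
  cases l with
  | nil => simp [pvSp]
  | cons c rest =>
    simp only [pvSp]
    split
    · simp
    · cases h : pvSp rest <;> simp [pvConsHead]

theorem pvConsHead_consHead (pre q : List Char) (ps : List (List Char)) :
    pvConsHead pre (pvConsHead q ps) = pvConsHead (pre ++ q) ps := by
  cases ps <;> simp [pvConsHead]

theorem pvGoAll (fuel : ℕ) : ∀ (l cur : List Char) (acc : List (List Char)), l.length ≤ fuel →
    PySem.Chars.splitOn.go ['='] fuel l cur acc = acc.reverse ++ pvConsHead cur.reverse (pvSp l) := by
  induction fuel with
  | zero =>
    intro l cur acc hl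
    have : l = [] := List.eq_nil_of_length_eq_zero (Nat.le_zero.mp hl)
    subst this; simp [PySem.Chars.splitOn.go, pvSp, pvConsHead]
  | succ f ih =>
    intro l cur acc hl
    cases l with
    | nil => simp [PySem.Chars.splitOn.go, pvSp, pvConsHead]
    | cons c rest =>
      by_cases hc : c = '='
      · subst hc
        simp only [PySem.Chars.splitOn.go]
        rw [if_pos (by simp [List.isPrefixOf])]
        rw [show List.drop ['='].length ('=' :: rest) = rest from rfl]
        rw [ih rest [] (List.reverse cur :: acc) (by simpa using Nat.lt_succ_iff.mp (by simpa using hl))]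
        cases h : pvSp rest with
        | nil => exact absurd h (pvSp_ne_nil rest)
        | cons p ps => simp [pvSp, pvConsHead, h]
      · have hpre : List.isPrefixOf ['='] (c :: rest) = false := by
          simp [List.isPrefixOf]; intro h; exact absurd h.symm hc
        simp only [PySem.Chars.splitOn.go]
        rw [hpre]
        simp only [Bool.false_eq_true, if_false]
        rw [ih rest (c :: cur) acc (by simpa using Nat.lt_succ_iff.mp (by simpa using hl))]
        simp [pvSp, hc, pvConsHead_consHead]

theorem pvSplitOn_eq (s : List Char) : PySem.Chars.splitOn s ['='] = pvSp s := by
  unfold PySem.Chars.splitOn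
  rw [pvGoAll (s.length + 1) s [] [] (by omega)]
  cases h : pvSp s with
  | nil => exact absurd h (pvSp_ne_nil s)
  | cons p ps => simp [pvConsHead]

theorem pvSp_not_mem (l : List Char) (h : '=' ∉ l) : pvSp l = [l] := by
  induction l with
  | nil => simp [pvSp]
  | cons c rest ih =>
    have hc : c ≠ '=' := fun hc => h (by simp [hc])
    have : '=' ∉ rest := fun hm => h (by simp [hm])
    simp [pvSp, hc, ih this, pvConsHead]

theorem pvSp_mem (l : List Char) (h : '=' ∈ l) :
    pvSp l = l.takeWhile (· ≠ '=') :: pvSp ((l.dropWhile (· ≠ '=')).tail) := by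
  induction l with
  | nil => simp at h
  | cons c rest ih =>
    by_cases hc : c = '='
    · subst hc; simp [pvSp, List.takeWhile, List.dropWhile]
    · have hm : '=' ∈ rest := by
        rcases List.mem_cons.mp h with h1 | h1
        · exact absurd h1.symm hc
        · exact h1
      simp only [pvSp, if_neg hc, ih hm]
      simp [List.takeWhile, List.dropWhile, hc, pvConsHead]

theorem pvPyGetNegOne {α : Type} (xs : List α) : PySem.List.pyGet? xs (-1) = xs.getLast? := by
  cases xs with
  | nil => simp [PySem.List.pyGet?, PySem.List.pyIdx?]
  | cons a l => simp [PySem.List.pyGet?, PySem.List.pyIdx?, List.getLast?_eq_getElem?]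

theorem pvAux_eq (s : List Char) : toVariantsAux s = toVariantsAltAux s := by
  induction hn : s.length using Nat.strong_induction_on generalizing s with
  | _ n ih =>
  subst hn
  by_cases h : '=' ∈ s
  · -- recursive case: '=' occurs in s
    have hin : PySem.Chars.isIn ['='] s = true := by
      rw [PySem.Chars.isIn_iff_infix]
      obtain ⟨l1, l2, rfl⟩ := List.append_of_mem h
      exact ⟨l1, l2, by simp⟩
    have hlt : ((s.dropWhile (· ≠ '=')).tail).length < s.length := pvTailLt s _ rfl h
    rw [toVariantsAux]
    simp only [hin, if_true]
    rw [pvSplitMax1_mem s h]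
    split
    case h_2 => rename_i hne; exact absurd rfl (hne _ _)
    rename_i head tail h2
    injection h2 with hh h2'
    injection h2' with htl
    subst hh htl
    rw [ih _ hlt _ rfl]
    -- now compute the B side at s
    unfold toVariantsAltAux
    simp only [pvSplitOn_eq]
    rw [pvSp_mem s h]
    obtain ⟨p, ps, hP⟩ := List.exists_cons_of_ne_nil (pvSp_ne_nil ((s.dropWhile (· ≠ '=')).tail))
    rw [hP]
    simp only [pvPyGetNegOne, PySem.List.slice_to_neg_one, List.getLast?_cons_cons,
      List.dropLast_cons₂, List.reverse_cons, List.foldl_append, List.foldl_cons, List.foldl_nil]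
  · have hin : PySem.Chars.isIn ['='] s = false := by
      rw [PySem.Chars.isIn_eq_false_iff]
      intro hinf; exact h (by simpa using hinf.mem (by simp))
    rw [toVariantsAux]
    rw [if_neg (by simp [hin])]
    unfold toVariantsAltAux
    rw [pvSplitOn_eq, pvSp_not_mem s h]
    simp [pvPyGetNegOne, PySem.List.slice_to_neg_one]

-- ===== VERDICT (by name: the statement is the Claim_ definition above) =====
theorem to_variants_spec : Claim_equal_to_variants := by
  intro phrase _
  unfold Spec_to_variants to_variants to_variants_alt
  rw [pvAux_eq]
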